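-- pv_equiv track=rewrite | github.com/GTonyJacobs/Collatz_predecessor_sets | scripts/count_preds_by_ratio.py | compute_k
-- ===== SOURCE A (Python) =====
-- def first_admissible_predecessor(n):
--     """Find the first admissible predecessor of n.
--        Return it, along with the corresponding power of 2."""
--     if n % 18 in {11, 17}:
--         return (2 * n - 1) // 3, 1
--     if n % 18 in {1, 13}:
--         return (4 * n - 1) // 3, 2
--     if n % 18 == 5:
--         return (8 * n - 1) // 3, 3
--     if n % 18 == 7:
--         return (16 * n - 1) // 3, 4
--
-- def next_pred(n):
--     """Given an admissible predecessor, find the next one of the same order.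
--        Return it, along with its corresponding power of 2."""
--     return (4 * n + 1, 2) if n % 6 == 1 else (16 * n + 5, 4)
--
-- def compute_k(n,depths):
--     """This function computes a specific predecessor of n, given a specific depths vector."""
--     current = n
--     total_k=0
--     for depth in depths:
--         if depth == 1:  # Depth 1 always uses first_admissible_predecessor
--             current,new_k = first_admissible_predecessor(current)
--             total_k=total_k+new_k
--         else:  # Depth > 1: Apply first_admissible_predecessor, then next_pred (depth-1) times
--             current,new_k = first_admissible_predecessor(current)  # First step: apply first_admissible_predecessor
--             total_k=total_k+new_k
--             for _ in range(depth - 1):  # Apply next_pred (depth-1) times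
--                 current,new_k = next_pred(current)
--                 total_k=total_k+new_k
--     return current, total_k
-- ===== SOURCE B (Python) =====
-- _K_OF_RES = {11: 1, 17: 1, 1: 2, 13: 2, 5: 3, 7: 4}
--
-- def compute_k(n, depths):
--     """Same predecessor walk, but the (depth-1) next_pred iterations are
--     collapsed: two consecutive next_pred steps are always m -> 64*m + 21
--     adding 6 to k, so q = (depth-1)//2 double-steps become the closed form
--     64**q * m + (64**q - 1)//3 via fast exponentiation."""
--     cur = n
--     total = 0
--     for d in depths:
--         kf = _K_OF_RES[cur % 18]
--         cur = ((1 << kf) * cur - 1) // 3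
--         total += kf
--         r = d - 1
--         if r > 0:
--             q, rem = divmod(r, 2)
--             p = pow(64, q)
--             cur = p * cur + (p - 1) // 3
--             total += 6 * q
--             if rem:
--                 if cur % 6 == 1:
--                     cur = 4 * cur + 1
--                     total += 2
--                 else:
--                     cur = 16 * cur + 5
--                     total += 4
--     return cur, total
-- ===== Notes on version B (the rewrite author's own statement) =====
-- stated objective: faster
-- what changed: B collapses the (depth-1)-step next_pred loop into the closed form 64**q*m + (64**q-1)//3 (q = (depth-1)//2 double-steps, since two consecutive next_pred steps are always m -> 64*m+21 adding 6 to k) computed with fast exponentiation, plus a residue-table first step; A iterates next_pred one step at a time.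
import Mathlib
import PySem

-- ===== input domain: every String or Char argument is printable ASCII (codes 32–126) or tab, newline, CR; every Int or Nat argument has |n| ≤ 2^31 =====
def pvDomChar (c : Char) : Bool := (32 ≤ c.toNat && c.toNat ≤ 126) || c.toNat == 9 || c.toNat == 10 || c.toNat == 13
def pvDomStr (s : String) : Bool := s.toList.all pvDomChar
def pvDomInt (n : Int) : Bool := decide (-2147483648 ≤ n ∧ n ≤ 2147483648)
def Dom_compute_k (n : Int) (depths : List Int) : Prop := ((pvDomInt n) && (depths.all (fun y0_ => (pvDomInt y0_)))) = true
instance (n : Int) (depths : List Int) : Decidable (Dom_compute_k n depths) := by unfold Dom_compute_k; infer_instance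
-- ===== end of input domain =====

-- B replaces A's one-at-a-time next_pred loop by the closed form 64^q·m + (64^q-1)/3
-- for q double-steps (computed by fast exponentiation): objective 'faster'.

-- ===== PORT A =====
-- first_admissible_predecessor: returns none where Python returns None (caller's unpack then raises TypeError)
def first_admissible_predecessor (n : Int) : Option (Int × Int) :=
  if PySem.Int.mod n 18 = 11 ∨ PySem.Int.mod n 18 = 17 then some (PySem.Int.floordiv (2*n - 1) 3, 1)
  else if PySem.Int.mod n 18 = 1 ∨ PySem.Int.mod n 18 = 13 then some (PySem.Int.floordiv (4*n - 1) 3, 2)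
  else if PySem.Int.mod n 18 = 5 then some (PySem.Int.floordiv (8*n - 1) 3, 3)
  else if PySem.Int.mod n 18 = 7 then some (PySem.Int.floordiv (16*n - 1) 3, 4)
  else none

def next_pred (n : Int) : Int × Int :=
  if PySem.Int.mod n 6 = 1 then (4*n + 1, 2) else (16*n + 5, 4)

-- the inner 'for _ in range(depth-1)' loop of A, carrying (current, total_k)
def npIter : Nat → Int × Int → Int × Int
  | 0, s => s
  | r+1, s =>
    let p := next_pred s.1
    npIter r (p.1, s.2 + p.2)

-- one iteration of A's outer 'for depth in depths' loop; none = the TypeError state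
def computeKStep (st : Option (Int × Int)) (d : Int) : Option (Int × Int) :=
  match st with
  | none => none
  | some (c, k) =>
    match first_admissible_predecessor c with
    | none => none
    | some (c1, k1) =>
      if d = 1 then some (c1, k + k1)
      else some (npIter (d - 1).toNat (c1, k + k1))

def compute_k (n : Int) (depths : List Int) : List Int :=
  match depths.foldl computeKStep (some (n, 0)) with
  | some (c, k) => [c, k]
  | none => []

-- ===== PORT B =====
-- the module-level dict _K_OF_RES of Source B
def kOfRes : PySem.Dict Int Int := PySem.Dict.ofList [(11, 1), (17, 1), (1, 2), (13, 2), (5, 3), (7, 4)]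

-- one iteration of B's loop; none = the KeyError state
def altStep (st : Option (Int × Int)) (d : Int) : Option (Int × Int) :=
  match st with
  | none => none
  | some (cur, total) =>
    match kOfRes.get? (PySem.Int.mod cur 18) with
    | none => none
    | some kf =>
      let cur1 := PySem.Int.floordiv (2 ^ kf.toNat * cur - 1) 3
      let total1 := total + kf
      let r := d - 1
      if 0 < r then
        let q := PySem.Int.floordiv r 2
        let rem := PySem.Int.mod r 2
        let p : Int := 64 ^ q.toNat
        let cur2 := p * cur1 + PySem.Int.floordiv (p - 1) 3
        let total2 := total1 + 6 * q
        if rem ≠ 0 then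
          if PySem.Int.mod cur2 6 = 1 then some (4*cur2 + 1, total2 + 2)
          else some (16*cur2 + 5, total2 + 4)
        else some (cur2, total2)
      else some (cur1, total1)

def compute_k_alt (n : Int) (depths : List Int) : List Int :=
  match depths.foldl altStep (some (n, 0)) with
  | some (c, k) => [c, k]
  | none => []

-- ===== PRECONDITION & SPEC =====
-- A raises (TypeError: first_admissible_predecessor returns None) as soon as the current value is
-- even or divisible by 3; coprimality to 6 is preserved by both recurrences, so A returns exactly
-- when depths is empty or n is coprime to 6.  Pre_ excludes nothing on which A returns.
def Pre_compute_k (n : Int) (depths : List Int) : Prop :=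
  depths = [] ∨ n % 6 = 1 ∨ n % 6 = 5
instance (n : Int) (depths : List Int) : Decidable (Pre_compute_k n depths) := by unfold Pre_compute_k; infer_instance

def pvWitness_compute_k : Int × List Int := (7, [2, 1, 3])

def Spec_compute_k (n : Int) (depths : List Int) (out : List Int) : Prop := out = compute_k_alt n depths
instance (n : Int) (depths : List Int) (out : List Int) : Decidable (Spec_compute_k n depths out) := by unfold Spec_compute_k; infer_instance

-- ===== CLAIM (what is proved, stated in full; the proofs are below) =====
def Claim_equal_compute_k : Prop := ∀ (n : Int) (depths : List Int), Dom_compute_k n depths → Pre_compute_k n depths → Spec_compute_k n depths (compute_k n depths)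

-- ===== LEMMAS AND PROOFS =====

-- the current value is a unit mod 6 throughout
def CoprimeInv (c : Int) : Prop := c % 6 = 1 ∨ c % 6 = 5

-- E q = (64^q - 1)/3, in the recursion the pairing induction produces
def Epart : Nat → Int
  | 0 => 0
  | q+1 => 21 * 64 ^ q + Epart q

theorem three_mul_Epart (q : Nat) : 3 * Epart q = 64 ^ q - 1 := by
  induction q with
  | zero => simp [Epart]
  | succ q ih => simp only [Epart, pow_succ]; linarith

theorem next_pred_inv (c : Int) (h : CoprimeInv c) : CoprimeInv (next_pred c).1 := by
  unfold next_pred CoprimeInv at *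
  rw [PySem.Int.mod_eq_emod_of_pos (by norm_num)]
  split_ifs with h1 <;> simp <;> omega

theorem npIter_inv (r : Nat) : ∀ c k, CoprimeInv c → CoprimeInv (npIter r (c, k)).1 := by
  induction r with
  | zero => intro c k h; simpa [npIter]
  | succ r ih =>
    intro c k h
    have h2 := next_pred_inv c h
    simp only [npIter]
    exact ih _ _ h2

theorem npIter_add (m r : Nat) (s : Int × Int) : npIter (m + r) s = npIter r (npIter m s) := by
  induction m generalizing s with
  | zero => simp [npIter]
  | succ m ih => simp only [Nat.succ_add, npIter]; exact ih _

theorem npIter_two (c k : Int) (h : CoprimeInv c) : npIter 2 (c, k) = (64*c + 21, k + 6) := by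
  rcases h with h | h
  · have e1 : next_pred c = (4*c + 1, 2) := by
      unfold next_pred; rw [PySem.Int.mod_eq_emod_of_pos (by norm_num), if_pos h]
    have e2 : next_pred (4*c + 1) = (16*(4*c + 1) + 5, 4) := by
      unfold next_pred; rw [PySem.Int.mod_eq_emod_of_pos (by norm_num), if_neg (by omega)]
    simp only [npIter, e1, e2, Prod.mk.injEq]
    constructor <;> ring
  · have e1 : next_pred c = (16*c + 5, 4) := by
      unfold next_pred; rw [PySem.Int.mod_eq_emod_of_pos (by norm_num), if_neg (by omega)]
    have e2 : next_pred (16*c + 5) = (4*(16*c + 5) + 1, 2) := by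
      unfold next_pred; rw [PySem.Int.mod_eq_emod_of_pos (by norm_num), if_pos (by omega)]
    simp only [npIter, e1, e2, Prod.mk.injEq]
    constructor <;> ring

theorem npIter_even (q : Nat) : ∀ c k, CoprimeInv c →
    npIter (2 * q) (c, k) = (64 ^ q * c + Epart q, k + 6 * (q : Int)) := by
  induction q with
  | zero => intro c k _; simp [npIter, Epart]
  | succ q ih =>
    intro c k h
    have hstep : (2 : Nat) * (q + 1) = 2 + 2 * q := by ring
    rw [hstep, npIter_add, npIter_two c k h]
    have hinv : CoprimeInv (64*c + 21) := by unfold CoprimeInv at *; omega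
    rw [ih _ _ hinv]
    simp only [Epart, pow_succ, Prod.mk.injEq]
    constructor
    · ring
    · push_cast; ring

theorem fdiv_exact (x y : Int) (h : 3 * y = x) : PySem.Int.floordiv x 3 = y := by
  rw [PySem.Int.floordiv_eq_ediv_of_pos (by norm_num)]
  omega

-- the two ports take the same step and preserve the invariant
theorem step_eq (c k d : Int) (h : CoprimeInv c) :
    ∃ c' k', computeKStep (some (c, k)) d = some (c', k') ∧
      altStep (some (c, k)) d = some (c', k') ∧ CoprimeInv c' := by
  have h18 : PySem.Int.mod c 18 = c % 18 := PySem.Int.mod_eq_emod_of_pos (by norm_num)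
  -- the six admissible residues mod 18, with A's first-step value and its invariant
  have hfap : ∃ c1 kf, first_admissible_predecessor c = some (c1, kf) ∧
      kOfRes.get? (PySem.Int.mod c 18) = some kf ∧
      PySem.Int.floordiv (2 ^ kf.toNat * c - 1) 3 = c1 ∧ CoprimeInv c1 := by
    have hc : c % 18 = 1 ∨ c % 18 = 5 ∨ c % 18 = 7 ∨ c % 18 = 11 ∨ c % 18 = 13 ∨ c % 18 = 17 := by
      unfold CoprimeInv at h; omega
    rcases hc with hc | hc | hc | hc | hc | hc
    · refine ⟨PySem.Int.floordiv (4*c - 1) 3, 2, ?_, ?_, ?_, ?_⟩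
      · norm_num [first_admissible_predecessor, h18, hc]
      · rw [h18, hc]; rfl
      · simp only [show Int.toNat 2 = 2 from rfl]; norm_num
      · unfold CoprimeInv; rw [PySem.Int.floordiv_eq_ediv_of_pos (by norm_num)]; omega
    · refine ⟨PySem.Int.floordiv (8*c - 1) 3, 3, ?_, ?_, ?_, ?_⟩
      · norm_num [first_admissible_predecessor, h18, hc]
      · rw [h18, hc]; rfl
      · simp only [show Int.toNat 3 = 3 from rfl]; norm_num
      · unfold CoprimeInv; rw [PySem.Int.floordiv_eq_ediv_of_pos (by norm_num)]; omega
    · refine ⟨PySem.Int.floordiv (16*c - 1) 3, 4, ?_, ?_, ?_, ?_⟩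
      · norm_num [first_admissible_predecessor, h18, hc]
      · rw [h18, hc]; rfl
      · simp only [show Int.toNat 4 = 4 from rfl]; norm_num
      · unfold CoprimeInv; rw [PySem.Int.floordiv_eq_ediv_of_pos (by norm_num)]; omega
    · refine ⟨PySem.Int.floordiv (2*c - 1) 3, 1, ?_, ?_, ?_, ?_⟩
      · norm_num [first_admissible_predecessor, h18, hc]
      · rw [h18, hc]; rfl
      · simp only [show Int.toNat 1 = 1 from rfl]; norm_num
      · unfold CoprimeInv; rw [PySem.Int.floordiv_eq_ediv_of_pos (by norm_num)]; omega
    · refine ⟨PySem.Int.floordiv (4*c - 1) 3, 2, ?_, ?_, ?_, ?_⟩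
      · norm_num [first_admissible_predecessor, h18, hc]
      · rw [h18, hc]; rfl
      · simp only [show Int.toNat 2 = 2 from rfl]; norm_num
      · unfold CoprimeInv; rw [PySem.Int.floordiv_eq_ediv_of_pos (by norm_num)]; omega
    · refine ⟨PySem.Int.floordiv (2*c - 1) 3, 1, ?_, ?_, ?_, ?_⟩
      · norm_num [first_admissible_predecessor, h18, hc]
      · rw [h18, hc]; rfl
      · simp only [show Int.toNat 1 = 1 from rfl]; norm_num
      · unfold CoprimeInv; rw [PySem.Int.floordiv_eq_ediv_of_pos (by norm_num)]; omega
  obtain ⟨c1, kf, hA, hB, hdiv, hinv1⟩ := hfap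
  by_cases hd1 : d = 1
  · -- depth == 1: no inner iterations on either side
    refine ⟨c1, k + kf, ?_, ?_, hinv1⟩
    · simp [computeKStep, hA, hd1]
    · simp only [altStep, hB, hdiv, hd1]
      norm_num
  · by_cases hdp : 0 < d - 1
    · -- depth ≥ 2: A iterates (d-1) next_pred steps, B uses the closed form
      have hq2 : PySem.Int.floordiv (d - 1) 2 = (d - 1) / 2 :=
        PySem.Int.floordiv_eq_ediv_of_pos (by norm_num)
      have hm2 : PySem.Int.mod (d - 1) 2 = (d - 1) % 2 :=
        PySem.Int.mod_eq_emod_of_pos (by norm_num)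
      set qn : Nat := ((d - 1) / 2).toNat with hqn
      have hE : PySem.Int.floordiv ((64:Int) ^ qn - 1) 3 = Epart qn :=
        fdiv_exact _ _ (three_mul_Epart qn)
      have hmid := npIter_even qn c1 (k + kf) hinv1
      set m : Int := 64 ^ qn * c1 + Epart qn with hmdef
      have hminv : CoprimeInv m := by
        have := npIter_inv (2 * qn) c1 (k + kf) hinv1
        rw [hmid] at this; exact this
      by_cases hrem : (d - 1) % 2 = 0
      · -- even number of inner steps
        have hnat : (d - 1).toNat = 2 * qn := by omega
        refine ⟨m, k + kf + 6 * (qn : Int), ?_, ?_, hminv⟩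
        · simp only [computeKStep, hA, if_neg hd1, hnat, hmid]
        · simp only [altStep, hB, hdiv, if_pos hdp, hq2, hm2, ← hqn, hE, ← hmdef]
          rw [if_neg (by omega)]
          simp only [Option.some.injEq, Prod.mk.injEq]
          exact ⟨trivial, by omega⟩
      · -- odd: one trailing next_pred step on the closed-form value
        have hnat : (d - 1).toNat = 2 * qn + 1 := by omega
        have hsplit : npIter ((d - 1).toNat) (c1, k + kf) =
            npIter 1 (m, k + kf + 6 * (qn : Int)) := by
          rw [hnat, npIter_add, hmid]
        have h6 : PySem.Int.mod m 6 = m % 6 := PySem.Int.mod_eq_emod_of_pos (by norm_num)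
        by_cases hm1 : m % 6 = 1
        · refine ⟨4*m + 1, k + kf + 6 * (qn : Int) + 2, ?_, ?_, by unfold CoprimeInv at *; omega⟩
          · simp only [computeKStep, hA, if_neg hd1, hsplit, npIter, next_pred, h6, if_pos hm1]
          · simp only [altStep, hB, hdiv, if_pos hdp, hq2, hm2, ← hqn, hE, ← hmdef, h6]
            rw [if_pos (by omega), if_pos hm1]
            simp only [Option.some.injEq, Prod.mk.injEq]
            exact ⟨trivial, by omega⟩
        · refine ⟨16*m + 5, k + kf + 6 * (qn : Int) + 4, ?_, ?_, by unfold CoprimeInv at *; omega⟩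
          · simp only [computeKStep, hA, if_neg hd1, hsplit, npIter, next_pred, h6, if_neg hm1]
          · simp only [altStep, hB, hdiv, if_pos hdp, hq2, hm2, ← hqn, hE, ← hmdef, h6]
            rw [if_pos (by omega), if_neg hm1]
            simp only [Option.some.injEq, Prod.mk.injEq]
            exact ⟨trivial, by omega⟩
    · -- depth ≤ 0 and ≠ 1: range(depth-1) is empty, B skips the closed form
      have hnat : (d - 1).toNat = 0 := by omega
      refine ⟨c1, k + kf, ?_, ?_, hinv1⟩
      · simp [computeKStep, hA, hd1, hnat, npIter]
      · simp only [altStep, hB, hdiv]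
        rw [if_neg hdp]

theorem loop_eq (depths : List Int) : ∀ c k, CoprimeInv c →
    ∃ c' k', depths.foldl computeKStep (some (c, k)) = some (c', k') ∧
      depths.foldl altStep (some (c, k)) = some (c', k') := by
  induction depths with
  | nil => intro c k _; exact ⟨c, k, rfl, rfl⟩
  | cons d rest ih =>
    intro c k h
    obtain ⟨c1, k1, hA, hB, h1⟩ := step_eq c k d h
    obtain ⟨c', k', hA', hB'⟩ := ih c1 k1 h1
    exact ⟨c', k', by simp [hA, hA'], by simp [hB, hB']⟩

-- ===== VERDICT (by name: the statement is the Claim_ definition above) =====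
theorem compute_k_spec : Claim_equal_compute_k := by
  intro n depths _ hpre
  unfold Spec_compute_k compute_k compute_k_alt
  rcases hpre with h | h
  · subst h; rfl
  · obtain ⟨c', k', hA, hB⟩ := loop_eq depths n 0 h
    rw [hA, hB]
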